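-- pv_equiv track=rewrite | github.com/volik97/RegularEx | main.py | format_contact
-- ===== SOURCE A (Python) =====
-- def format_contact(contact_list):
--     """Форматирование списка контактов (проверка контакта по имени и фамилии, удаление дупликатов)"""
--     phone_book = dict()
--     for contact in contact_list:
--         key_contact = f'{contact[0]} {contact[1]}'
--         if key_contact in phone_book:
--             value_contact = phone_book[key_contact]
--             for i in range(len(value_contact)):
--                 if contact[i]:
--                     value_contact[i] = contact[i]
--         else:
--             phone_book[key_contact] = contact
--     return list(phone_book.values())
-- ===== SOURCE B (Python) =====
-- def format_contact(contact_list):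
--     """Форматирование списка контактов (проверка контакта по имени и фамилии, удаление дупликатов)"""
--     # Pass 1: group the contacts by their 'name surname' key, in first-seen order.
--     groups = {}
--     for contact in contact_list:
--         key = f'{contact[0]} {contact[1]}'
--         groups[key] = groups.get(key, []) + [contact]
--     # Pass 2: merge each group onto its first contact (mutated in place, as the original does).
--     result = []
--     for group in groups.values():
--         base = group[0]
--         for later in group[1:]:
--             base[:] = [later[i] if later[i] else b for i, b in enumerate(base)]
--         result.append(base)
--     return result
-- ===== Notes on version B (the rewrite author's own statement) =====
-- stated objective: alternative
-- what changed: A deduplicates and merges in a single interleaved pass over a dict of merged values; B first groups all contacts by their 'name surname' key into lists and then, per group in first-seen order, folds the later contacts onto the first one.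
import Mathlib
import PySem

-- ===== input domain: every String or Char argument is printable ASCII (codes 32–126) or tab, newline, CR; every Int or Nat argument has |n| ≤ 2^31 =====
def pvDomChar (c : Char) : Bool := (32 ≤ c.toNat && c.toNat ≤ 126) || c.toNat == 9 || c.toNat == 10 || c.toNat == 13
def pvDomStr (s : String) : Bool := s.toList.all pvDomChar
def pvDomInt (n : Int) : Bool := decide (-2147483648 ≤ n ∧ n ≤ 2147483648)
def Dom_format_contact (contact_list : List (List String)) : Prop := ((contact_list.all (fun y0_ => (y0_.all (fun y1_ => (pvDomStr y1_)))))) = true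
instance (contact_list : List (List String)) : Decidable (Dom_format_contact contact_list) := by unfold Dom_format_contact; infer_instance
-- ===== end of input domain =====

-- B replaces A's single interleaved dedup/merge pass by a group-by-key pass followed by a per-group
-- merge fold (objective: alternative decomposition, same asymptotic cost). Both A and B mutate the
-- first-occurrence contact lists of the argument in place; the equivalence proved here is about the
-- return value only.

-- ===== PORT A =====
-- f'{contact[0]} {contact[1]}' : contact[0]/contact[1] raise IndexError for len < 2 (excluded by Pre_);
-- ported with pyGetD on those inputs.
def pvKeyOf (c : List String) : String :=
  PySem.List.pyGetD c 0 "" ++ " " ++ PySem.List.pyGetD c 1 ""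

-- the inner loop 'for i in range(len(value_contact)): if contact[i]: value_contact[i] = contact[i]';
-- where Python raises IndexError on contact[i] (excluded by Pre_) the port skips the index.
def pvMergeA (v c : List String) : List String :=
  (PySem.List.pyRange 0 (v.length : Int) 1).foldl
    (fun w i =>
      match PySem.List.pyGet? c i with
      | none => w
      | some ci => if ci ≠ "" then PySem.List.pySetD w i ci else w) v

def format_contact (contact_list : List (List String)) : List (List String) :=
  (contact_list.foldl
    (fun (phone_book : PySem.Dict String (List String)) contact =>
      let k := pvKeyOf contact
      match phone_book.get? k with
      | some value_contact => phone_book.insert k (pvMergeA value_contact contact)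
      | none => phone_book.insert k contact)
    PySem.Dict.empty).values

-- ===== PORT B =====
-- '[later[i] if later[i] else b for i, b in enumerate(base)]'; where Python raises IndexError on
-- later[i] (excluded by Pre_) the port takes the default "".
def pvMergeB (base later : List String) : List String :=
  (PySem.List.enumerate base 0).map
    (fun p => let ci := PySem.List.pyGetD later p.1 ""; if ci ≠ "" then ci else p.2)

-- 'base = group[0]; for later in group[1:]' — groups are built nonempty, ported as a head/tail match.
def pvMergeFold (group : List (List String)) : List String :=
  match group with
  | [] => []
  | base :: rest => rest.foldl pvMergeB base

def format_contact_alt (contact_list : List (List String)) : List (List String) :=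
  let groups := contact_list.foldl
    (fun (g : PySem.Dict String (List (List String))) contact =>
      let k := pvKeyOf contact
      g.insert k (g.getD k [] ++ [contact]))
    PySem.Dict.empty
  groups.values.map pvMergeFold

-- ===== PRECONDITION & SPEC =====
-- Pre_ excludes exactly the inputs where Python A raises IndexError (Python B raises there too):
-- a contact with fewer than 2 fields, or a duplicate-key contact shorter than the first
-- occurrence of its key (the merge loop then indexes past its end).
def Pre_format_contact (contact_list : List (List String)) : Prop :=
  (∀ c ∈ contact_list, 2 ≤ c.length) ∧
  (∀ i < contact_list.length, ∀ j < contact_list.length,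
    (i < j ∧ (∀ i' < i, pvKeyOf (contact_list.getD i' []) ≠ pvKeyOf (contact_list.getD i [])) ∧
      pvKeyOf (contact_list.getD i []) = pvKeyOf (contact_list.getD j [])) →
    (contact_list.getD i []).length ≤ (contact_list.getD j []).length)
instance (contact_list : List (List String)) : Decidable (Pre_format_contact contact_list) := by
  unfold Pre_format_contact; infer_instance

def pvWitness_format_contact : List (List String) :=
  [["Ivan", "Petrov", "123"], ["Ivan", "Petrov", "", "ivan@x.ru"], ["Anna", "Orlova"]]

def Spec_format_contact (contact_list : List (List String)) (out : List (List String)) : Prop := out = format_contact_alt contact_list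
instance (contact_list : List (List String)) (out : List (List String)) : Decidable (Spec_format_contact contact_list out) := by unfold Spec_format_contact; infer_instance

-- ===== CLAIM (what is proved, stated in full; the proofs are below) =====
def Claim_equal_format_contact : Prop := ∀ (contact_list : List (List String)), Dom_format_contact contact_list → Pre_format_contact contact_list → Spec_format_contact contact_list (format_contact contact_list)

-- ===== LEMMAS AND PROOFS =====

-- pointwise value of the A-side index-set fold
def pvG (c : List String) (j : Nat) (b : String) : String :=
  match PySem.List.pyGet? c (j : Int) with
  | none => b
  | some ci => if ci ≠ "" then ci else b

-- the value a B-side dict entry carries for the group a A-side entry merged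
def pvF (p : String × List (List String)) : String × List String := (p.1, pvMergeFold p.2)

theorem pv_foldl_set_getElem? (c : List String) :
    ∀ (idxs : List Int) (w : List String), idxs.Nodup →
    (∀ i ∈ idxs, 0 ≤ i ∧ i.toNat < w.length) → ∀ (j : Nat),
    ((idxs.foldl (fun w i =>
      match PySem.List.pyGet? c i with
      | none => w
      | some ci => if ci ≠ "" then PySem.List.pySetD w i ci else w) w)[j]?)
    = if (j : Int) ∈ idxs then (w[j]?).map (pvG c j) else w[j]? := by
  intro idxs
  induction idxs with
  | nil => intro w _ _ j; simp
  | cons i is ih =>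
    intro w hnd hb j
    have hi : 0 ≤ i ∧ i.toNat < w.length := hb i (by simp)
    set w' : List String := (match PySem.List.pyGet? c i with
      | none => w
      | some ci => if ci ≠ "" then PySem.List.pySetD w i ci else w) with hw'
    have hlw : w'.length = w.length := by
      rw [hw']
      cases h : PySem.List.pyGet? c i with
      | none => rfl
      | some ci =>
        by_cases hc : ci = "" <;> simp [hc, PySem.List.length_pySetD]
    have hself : (j : Int) = i → w'[j]? = (w[j]?).map (pvG c j) := by
      intro hj
      have hjl : j < w.length := by
        have h2 := hi.2
        have : i.toNat = j := by omega
        omega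
      have hwj : w[j]? = some w[j] := List.getElem?_eq_getElem hjl
      rw [hw']
      cases h : PySem.List.pyGet? c i with
      | none =>
        have hji : PySem.List.pyGet? c (j:Int) = none := by rw [hj]; exact h
        simp [hwj, pvG, hji]
      | some ci =>
        have hji : PySem.List.pyGet? c (j:Int) = some ci := by rw [hj]; exact h
        by_cases hc : ci = ""
        · simp [hc, hwj, pvG, hji]
        · have hset : PySem.List.pySetD w i ci = w.set i.toNat ci :=
            PySem.List.pySetD_of_nonneg w ci hi.1
          have hij : i.toNat = j := by omega
          simp [hc, hset, hij, hjl, pvG, hji]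
    have hne : (j : Int) ≠ i → w'[j]? = w[j]? := by
      intro hj
      rw [hw']
      cases h : PySem.List.pyGet? c i with
      | none => rfl
      | some ci =>
        by_cases hc : ci = ""
        · simp [hc]
        · have hset : PySem.List.pySetD w i ci = w.set i.toNat ci :=
            PySem.List.pySetD_of_nonneg w ci hi.1
          have hij : i.toNat ≠ j := by omega
          simp [hc, hset, List.getElem?_set_ne hij]
    have hb' : ∀ x ∈ is, 0 ≤ x ∧ x.toNat < w'.length := by
      intro x hx; rw [hlw]; exact hb x (List.mem_cons_of_mem _ hx)
    have hstep : (List.foldl (fun w i =>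
      match PySem.List.pyGet? c i with
      | none => w
      | some ci => if ci ≠ "" then PySem.List.pySetD w i ci else w) w (i :: is))
      = List.foldl (fun w i =>
      match PySem.List.pyGet? c i with
      | none => w
      | some ci => if ci ≠ "" then PySem.List.pySetD w i ci else w) w' is := by
      rw [List.foldl_cons]
    rw [hstep, ih w' hnd.of_cons hb' j]
    by_cases hmem : (j : Int) ∈ is
    · have hji : (j : Int) ≠ i := by
        intro h; exact (List.nodup_cons.mp hnd).1 (h ▸ hmem)
      simp [hmem, hne hji]
    · by_cases hji : (j : Int) = i
      · simp [hji, hself hji]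
        intro h
        exact absurd (by rw [hji]; exact h) hmem
      · simp [hmem, hji, hne hji]



theorem pv_getD_get? (c : List String) (i : Int) :
    PySem.List.pyGetD c i "" = (PySem.List.pyGet? c i).getD "" := by
  simp [PySem.List.pyGetD, PySem.List.pyGet?]

theorem pv_mergeA_eq_mergeB (v c : List String) : pvMergeA v c = pvMergeB v c := by
  apply List.ext_getElem?
  intro j
  have hA : (pvMergeA v c)[j]? = if (j:Int) ∈ PySem.List.pyRange 0 (v.length : Int) 1
      then (v[j]?).map (pvG c j) else v[j]? := by
    apply pv_foldl_set_getElem? c _ v (PySem.List.nodup_pyRange_one 0 _)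
    intro i hi
    rw [PySem.List.mem_pyRange_one] at hi
    constructor
    · exact hi.1
    · omega
  rw [hA]
  have hB : (pvMergeB v c)[j]? = (v[j]?).map (fun b =>
      let ci := PySem.List.pyGetD c (j:Int) ""; if ci ≠ "" then ci else b) := by
    unfold pvMergeB
    rw [List.getElem?_map, PySem.List.getElem?_enumerate]
    cases v[j]? <;> simp
  rw [hB]
  by_cases hj : j < v.length
  · have hmem : (j:Int) ∈ PySem.List.pyRange 0 (v.length : Int) 1 := by
      rw [PySem.List.mem_pyRange_one]; omega
    simp only [hmem, if_pos]
    apply congrArg (fun f => Option.map f v[j]?)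
    funext b
    rw [pv_getD_get?]
    unfold pvG
    cases h : PySem.List.pyGet? c (j:Int) with
    | none => simp
    | some ci => by_cases hc : ci = "" <;> simp [hc]
  · have hmem : ¬ ((j:Int) ∈ PySem.List.pyRange 0 (v.length : Int) 1) := by
      rw [PySem.List.mem_pyRange_one]; omega
    have : v[j]? = none := List.getElem?_eq_none (by omega)
    simp [hmem, this]



theorem pv_get?_mk_map (l : List (String × List (List String))) (k : String) :
    (PySem.Dict.mk (l.map pvF)).get? k = ((PySem.Dict.mk l).get? k).map pvMergeFold := by
  induction l with
  | nil => simp [PySem.Dict.get?]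
  | cons a t ih =>
    rw [List.map_cons]
    show (PySem.Dict.mk ((a.1, pvMergeFold a.2) :: t.map pvF)).get? k = _
    rw [PySem.Dict.get?_mk_cons]
    cases a with
    | mk k' v' =>
      rw [PySem.Dict.get?_mk_cons]
      by_cases h : k' == k
      · simp [h]
      · simp only [h]
        simpa using ih

theorem pv_items_insert_map (pb : PySem.Dict String (List String))
    (g : PySem.Dict String (List (List String))) (k : String) (grp : List (List String))
    (h : pb.items = g.items.map pvF) :
    (pb.insert k (pvMergeFold grp)).items = ((g.insert k grp).items).map pvF := by
  have hkeys : pb.keys = g.keys := by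
    simp only [PySem.Dict.keys, h, List.map_map]
    rfl
  have hcont : pb.contains k = g.contains k := by
    rw [PySem.Dict.contains_eq_decide_mem_keys, PySem.Dict.contains_eq_decide_mem_keys, hkeys]
  rw [PySem.Dict.items_insert, PySem.Dict.items_insert, hcont]
  by_cases hc : g.contains k
  · simp only [hc, if_pos, h, List.map_map]
    apply List.map_congr_left
    intro p _
    by_cases hp : p.1 = k <;> simp [pvF, hp]
  · simp [hc, h, pvF]

theorem pv_get?_of_items_map (pb : PySem.Dict String (List String))
    (g : PySem.Dict String (List (List String))) (k : String)
    (h : pb.items = g.items.map pvF) :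
    pb.get? k = (g.get? k).map pvMergeFold := by
  have h1 : pb = PySem.Dict.mk (g.items.map pvF) := PySem.Dict.ext h
  have h2 : g = PySem.Dict.mk g.items := PySem.Dict.ext rfl
  rw [h1, h2, pv_get?_mk_map]

theorem pv_mergeFold_append (grp : List (List String)) (c : List String) (h : grp ≠ []) :
    pvMergeFold (grp ++ [c]) = pvMergeA (pvMergeFold grp) c := by
  cases grp with
  | nil => exact absurd rfl h
  | cons b rest =>
    show pvMergeFold (b :: (rest ++ [c])) = _
    simp only [pvMergeFold, List.foldl_append, List.foldl_cons, List.foldl_nil]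
    rw [pv_mergeA_eq_mergeB]

theorem pv_main (l : List (List String)) (keyOf : List String → String) :
    ∀ (pb : PySem.Dict String (List String)) (g : PySem.Dict String (List (List String))),
    pb.items = g.items.map pvF → (∀ p ∈ g.items, p.2 ≠ []) →
    (l.foldl (fun pb contact =>
        let k := keyOf contact
        match pb.get? k with
        | some v => pb.insert k (pvMergeA v contact)
        | none => pb.insert k contact) pb).items
    = ((l.foldl (fun g contact =>
        let k := keyOf contact
        g.insert k (g.getD k [] ++ [contact])) g).items).map pvF := by
  induction l with
  | nil => intro pb g h _; exact h
  | cons c t ih =>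
    intro pb g h hne
    rw [List.foldl_cons, List.foldl_cons]
    have hget := pv_get?_of_items_map pb g (keyOf c) h
    cases hg : g.get? (keyOf c) with
    | none =>
      have hpb : pb.get? (keyOf c) = none := by rw [hget, hg]; rfl
      have hgd : g.getD (keyOf c) [] = [] := PySem.Dict.getD_of_get?_eq_none g [] hg
      simp only [hpb, hgd, List.nil_append]
      apply ih
      · have : pvMergeFold [c] = c := rfl
        rw [← this]
        exact pv_items_insert_map pb g (keyOf c) [c] h
      · intro p hp
        rcases (PySem.Dict.mem_items_insert _ _ _ _).mp hp with h1 | h2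
        · rw [h1]; simp
        · exact hne p h2.1
    | some grp =>
      have hpb : pb.get? (keyOf c) = some (pvMergeFold grp) := by rw [hget, hg]; rfl
      have hgd : g.getD (keyOf c) [] = grp := PySem.Dict.getD_of_get?_eq_some g [] hg
      have hgrpne : grp ≠ [] := hne _ (PySem.Dict.mem_items_of_get?_eq_some g hg)
      simp only [hpb, hgd]
      apply ih
      · rw [← pv_mergeFold_append grp c hgrpne]
        exact pv_items_insert_map pb g (keyOf c) (grp ++ [c]) h
      · intro p hp
        rcases (PySem.Dict.mem_items_insert _ _ _ _).mp hp with h1 | h2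
        · rw [h1]; simp
        · exact hne p h2.1

-- ===== VERDICT (by name: the statement is the Claim_ definition above) =====
theorem format_contact_spec : Claim_equal_format_contact := by
  intro l _ _
  show format_contact l = format_contact_alt l
  unfold format_contact format_contact_alt
  have h := pv_main l pvKeyOf PySem.Dict.empty PySem.Dict.empty rfl (by intro p hp; simp [PySem.Dict.empty] at hp)
  simp only [PySem.Dict.values, h, List.map_map]
  rfl
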